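-- pv_equiv track=rewrite | github.com/makataomu/svd_python | EigenSolver.py | get_zero_variables
-- ===== SOURCE A (Python) =====
-- def get_zero_variables(independent_rows):
--     """
--     variables that weren'r mentioned are free and form an eigenvector
--      that consists only with them
--     """
--     zero_vars_flag = [1 for i in range(len(independent_rows[0]))]
--
--     for i, row in enumerate(independent_rows):
--         for j, value in enumerate(row):
--             if value != 0:
--                 zero_vars_flag[j] = 0
--
--     zero_vars = []
--     for var, flag in enumerate(zero_vars_flag):
--         if flag:
--             zero_vars.append(var)
--
--     return zero_vars
-- ===== SOURCE B (Python) =====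
-- def get_zero_variables(independent_rows):
--     """
--     variables that weren'r mentioned are free and form an eigenvector
--      that consists only with them
--     """
--     return [j for j in range(len(independent_rows[0]))
--             if all(row[j] == 0 for row in independent_rows)]
-- ===== Notes on version B (the rewrite author's own statement) =====
-- stated objective: simpler
-- what changed: Column-first list comprehension with a short-circuiting all() per column replaces the row-major double loop that maintains and then re-scans a flag array.
-- outside the precondition, e.g. on get_zero_variables([[0, 0], [1]]): A returns [1], B raises IndexError
import Mathlib
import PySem

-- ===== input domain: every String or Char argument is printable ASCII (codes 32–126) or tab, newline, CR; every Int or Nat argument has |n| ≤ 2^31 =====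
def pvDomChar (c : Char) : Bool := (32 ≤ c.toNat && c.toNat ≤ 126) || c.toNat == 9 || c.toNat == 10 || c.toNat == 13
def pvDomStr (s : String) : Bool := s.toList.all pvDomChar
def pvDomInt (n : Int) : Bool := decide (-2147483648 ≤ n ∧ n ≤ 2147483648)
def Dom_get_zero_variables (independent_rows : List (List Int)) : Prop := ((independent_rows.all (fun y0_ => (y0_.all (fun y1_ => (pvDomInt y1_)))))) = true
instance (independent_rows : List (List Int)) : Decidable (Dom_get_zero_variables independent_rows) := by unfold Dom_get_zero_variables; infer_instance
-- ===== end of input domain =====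

-- B replaces A's row-major double loop over a mutable flag array by a single column-first
-- filter of the column indices (all-zero test per column): simpler, no flag accumulator.


-- ===== PORT A =====
-- A-side helper: the inner loop 'for j, value in enumerate(row): if value != 0: zero_vars_flag[j] = 0'
-- (zero_vars_flag[j] = 0 is ported with pySetD; exact under Pre_, which keeps the written index in range)
def pvProcRow (row : List Int) (s : Int) (fl : List Int) : List Int :=
  (PySem.List.enumerate row s).foldl
    (fun fl jv => if jv.2 ≠ 0 then PySem.List.pySetD fl jv.1 0 else fl) fl

def get_zero_variables (independent_rows : List (List Int)) : List Int :=
  -- zero_vars_flag = [1 for i in range(len(independent_rows[0]))]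
  let flags0 : List Int :=
    (PySem.List.pyRange 0 (((PySem.List.pyGet? independent_rows 0).getD []).length : Int) 1).map
      (fun _ => (1 : Int))
  -- for i, row in enumerate(independent_rows): <inner loop pvProcRow>
  let flags := independent_rows.foldl (fun fl row => pvProcRow row 0 fl) flags0
  -- for var, flag in enumerate(zero_vars_flag): if flag: zero_vars.append(var)
  (PySem.List.enumerate flags 0).foldl
    (fun acc vf => if vf.2 ≠ 0 then acc ++ [vf.1] else acc) []

-- ===== PORT B =====
def get_zero_variables_alt (independent_rows : List (List Int)) : List Int :=
  -- [j for j in range(len(independent_rows[0])) if all(row[j] == 0 for row in independent_rows)]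
  -- (row[j] is ported with pyGet?; exact under Pre_, which keeps j in range for every row)
  (PySem.List.pyRange 0 (((PySem.List.pyGet? independent_rows 0).getD []).length : Int) 1).filter
    (fun j => independent_rows.all (fun row => PySem.List.pyGet? row j == some 0))

-- ===== PRECONDITION & SPEC =====
-- Pre_ excludes: the empty list (A raises IndexError on independent_rows[0]); rows longer than the
-- first row with a nonzero entry beyond its width (A raises IndexError writing the flag array); and
-- rows shorter than the first row — a defensible corner where A's value (missing entries counted as
-- zero) is an accident of the flag-array length and B raises IndexError.
def Pre_get_zero_variables (independent_rows : List (List Int)) : Prop :=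
  independent_rows ≠ [] ∧
    ∀ row ∈ independent_rows,
      (independent_rows.headD []).length ≤ row.length ∧
        (row.drop (independent_rows.headD []).length).all (fun x => x = 0)
instance (independent_rows : List (List Int)) : Decidable (Pre_get_zero_variables independent_rows) := by
  unfold Pre_get_zero_variables; infer_instance
def pvWitness_get_zero_variables : List (List Int) := [[0, 1], [0, 0]]

def Spec_get_zero_variables (independent_rows : List (List Int)) (out : List Int) : Prop := out = get_zero_variables_alt independent_rows
instance (independent_rows : List (List Int)) (out : List Int) : Decidable (Spec_get_zero_variables independent_rows out) := by unfold Spec_get_zero_variables; infer_instance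

-- ===== CLAIM (what is proved, stated in full; the proofs are below) =====
def Claim_equal_get_zero_variables : Prop := ∀ (independent_rows : List (List Int)), Dom_get_zero_variables independent_rows → Pre_get_zero_variables independent_rows → Spec_get_zero_variables independent_rows (get_zero_variables independent_rows)

-- ===== LEMMAS AND PROOFS =====

lemma pvProcRow_nil (s : Int) (fl : List Int) : pvProcRow [] s fl = fl := rfl

lemma pvProcRow_cons (x : Int) (row : List Int) (s : Int) (fl : List Int) :
    pvProcRow (x :: row) s fl
      = pvProcRow row (s + 1) (if x ≠ 0 then PySem.List.pySetD fl s 0 else fl) := by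
  simp [pvProcRow, PySem.List.enumerate_cons]

-- after A's inner loop on one row (indices offset by s), flag j is cleared iff the row has a
-- nonzero entry at column j - s
lemma pvProcRow_getElem? (row : List Int) (s : Nat) (fl : List Int) (j : Nat) :
    (pvProcRow row (s : Int) fl)[j]?
      = if s ≤ j ∧ j - s < row.length ∧ row.getD (j - s) 0 ≠ 0
        then fl[j]?.map (fun _ => 0) else fl[j]? := by
  induction row generalizing s fl with
  | nil =>
    rw [pvProcRow_nil]
    simp
  | cons x row ih =>
    rw [pvProcRow_cons]
    have hs1 : ((s : Int) + 1) = ((s + 1 : Nat) : Int) := by push_cast; ring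
    rw [hs1, ih]
    by_cases hj : j = s
    · subst hj
      rw [if_neg (by omega : ¬ (j + 1 ≤ j ∧ j - (j+1) < row.length ∧ row.getD (j - (j+1)) 0 ≠ 0))]
      by_cases hx : x = 0
      · rw [if_neg (by simp [hx]), if_neg (by simp [hx])]
      · rw [if_pos (by simpa using hx),
            if_pos (show j ≤ j ∧ j - j < (x :: row).length ∧ (x :: row).getD (j - j) 0 ≠ 0 from
              ⟨le_refl j, by simp, by simpa using hx⟩)]
        rw [show ((j : Int)) = ((j : Nat) : Int) from rfl, PySem.List.pySetD_natCast]
        by_cases hlt : j < fl.length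
        · simp [hlt]
        · rw [List.getElem?_eq_none (by simpa using (by omega : fl.length ≤ j)),
              List.getElem?_eq_none (by omega)]
          rfl
    · have hset : (if x ≠ 0 then PySem.List.pySetD fl (s : Int) 0 else fl)[j]? = fl[j]? := by
        by_cases hx : x = 0
        · rw [if_neg (by simp [hx])]
        · rw [if_pos (by simpa using hx),
             show ((s : Int)) = ((s : Nat) : Int) from rfl, PySem.List.pySetD_natCast,
             List.getElem?_set_ne (by omega : s ≠ j)]
      rw [hset]
      by_cases hc : s + 1 ≤ j ∧ j - (s + 1) < row.length ∧ row.getD (j - (s + 1)) 0 ≠ 0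
      · rw [if_pos hc, if_pos]
        obtain ⟨h1, h2, h3⟩ := hc
        refine ⟨by omega, by simp only [List.length_cons]; omega, ?_⟩
        rw [show j - s = (j - (s + 1)) + 1 by omega]
        simpa using h3
      · rw [if_neg hc, if_neg]
        rintro ⟨h1, h2, h3⟩
        apply hc
        simp only [List.length_cons] at h2
        refine ⟨by omega, by omega, ?_⟩
        rw [show j - s = (j - s - 1) + 1 by omega] at h3
        rw [show j - (s + 1) = (j - s) - 1 by omega]
        simpa using h3

-- after A's outer loop, flag j is cleared iff some row has a nonzero entry in column j
lemma pvFoldRows_getElem? (rows : List (List Int)) (fl : List Int) (j : Nat) :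
    (rows.foldl (fun fl row => pvProcRow row 0 fl) fl)[j]?
      = if ∃ row ∈ rows, j < row.length ∧ row.getD j 0 ≠ 0
        then fl[j]?.map (fun _ => 0) else fl[j]? := by
  induction rows generalizing fl with
  | nil => simp
  | cons r rows ih =>
    simp only [List.foldl_cons]
    rw [ih]
    have hr : (pvProcRow r 0 fl)[j]?
        = if j < r.length ∧ r.getD j 0 ≠ 0 then fl[j]?.map (fun _ => 0) else fl[j]? := by
      have := pvProcRow_getElem? r 0 fl j
      simpa using this
    rw [hr]
    by_cases hc1 : j < r.length ∧ r.getD j 0 ≠ 0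
    · rw [if_pos hc1]
      by_cases hc2 : ∃ row ∈ rows, j < row.length ∧ row.getD j 0 ≠ 0
      · rw [if_pos hc2, if_pos ⟨r, List.mem_cons_self, hc1⟩, Option.map_map]
        rfl
      · rw [if_neg hc2, if_pos ⟨r, List.mem_cons_self, hc1⟩]
    · rw [if_neg hc1]
      by_cases hc2 : ∃ row ∈ rows, j < row.length ∧ row.getD j 0 ≠ 0
      · rw [if_pos hc2, if_pos]
        obtain ⟨row, hm, h⟩ := hc2
        exact ⟨row, List.mem_cons_of_mem r hm, h⟩
      · rw [if_neg hc2, if_neg]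
        rintro ⟨row, hm, h⟩
        rcases List.mem_cons.1 hm with h1 | h1
        · exact hc1 (h1 ▸ h)
        · exact hc2 ⟨row, h1, h⟩

lemma pvProcRow_length (row : List Int) (s : Int) (fl : List Int) :
    (pvProcRow row s fl).length = fl.length := by
  induction row generalizing s fl with
  | nil => rw [pvProcRow_nil]
  | cons x row ih =>
    rw [pvProcRow_cons, ih]
    by_cases hx : x = 0
    · rw [if_neg (by simp [hx])]
    · rw [if_pos (by simpa using hx), PySem.List.length_pySetD]

lemma pvFoldRows_length (rows : List (List Int)) (fl : List Int) :
    (rows.foldl (fun fl row => pvProcRow row 0 fl) fl).length = fl.length := by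
  induction rows generalizing fl with
  | nil => rfl
  | cons r rows ih => rw [List.foldl_cons, ih, pvProcRow_length]

-- ===== VERDICT (by name: the statement is the Claim_ definition above) =====
theorem get_zero_variables_spec : Claim_equal_get_zero_variables := by
  intro rows _ hpre
  obtain ⟨hne, hpre2⟩ := hpre
  have hlen : ∀ row ∈ rows, (rows.headD []).length ≤ row.length := fun row hm => (hpre2 row hm).1
  unfold Spec_get_zero_variables get_zero_variables get_zero_variables_alt
  obtain ⟨r0, rest, rfl⟩ : ∃ r0 rest, rows = r0 :: rest := by
    cases rows with
    | nil => exact absurd rfl hne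
    | cons a l => exact ⟨a, l, rfl⟩
  simp only [List.headD_cons] at hlen
  simp only [PySem.List.pyGet?_zero_cons, Option.getD_some]
  set n := r0.length with hn
  set flags := (r0 :: rest).foldl
      (fun fl row => pvProcRow row 0 fl)
      ((PySem.List.pyRange 0 (n : Int) 1).map (fun _ => (1 : Int))) with hflags
  have hflen : flags.length = n := by
    rw [hflags, pvFoldRows_length, List.length_map, PySem.List.length_pyRange_one]
    omega
  have hget : ∀ j : Nat, j < n →
      flags[j]? = some (if ∃ row ∈ r0 :: rest, j < row.length ∧ row.getD j 0 ≠ 0 then 0 else 1) := by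
    intro j hj
    rw [hflags, pvFoldRows_getElem?]
    have hbase : ((PySem.List.pyRange 0 (n : Int) 1).map (fun _ => (1 : Int)))[j]? = some 1 := by
      rw [List.getElem?_map, PySem.List.getElem?_pyRange_one,
          if_pos (show j < ((n : Int) - 0).toNat by omega)]
      rfl
    rw [hbase]
    split_ifs <;> rfl
  -- A's final loop is the filter of the enumerated flag list
  rw [PySem.List.foldl_append_ite (fun vf : Int × Int => vf.2 ≠ 0) (fun vf : Int × Int => vf.1)]
  rw [PySem.List.enumerate_eq_map_pyRange flags 0, List.filter_map, List.map_map]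
  rw [show PySem.List.len flags = (n : Int) by simp [PySem.List.len, hflen]]
  simp only [Function.comp_def]
  rw [show ((fun j => ((fun j => (j, PySem.List.pyGetD flags j 0)) j).1) : Int → Int) = id from rfl,
      List.map_id]
  apply List.filter_congr
  intro j hj
  rw [PySem.List.mem_pyRange_one] at hj
  obtain ⟨hj0, hjn⟩ := hj
  have hk : j = ((j.toNat : Nat) : Int) := by omega
  have hkn : j.toNat < n := by omega
  have hD : PySem.List.pyGetD flags j 0
      = if ∃ row ∈ r0 :: rest, j.toNat < row.length ∧ row.getD j.toNat 0 ≠ 0 then 0 else 1 := by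
    rw [hk, PySem.List.pyGetD_natCast, List.getD_eq_getElem?_getD, hget j.toNat hkn]
    rfl
  rw [hD]
  by_cases hE : ∃ row ∈ r0 :: rest, j.toNat < row.length ∧ row.getD j.toNat 0 ≠ 0
  · rw [if_pos hE]
    obtain ⟨row, hm, hlt, hne0⟩ := hE
    rw [List.getD_eq_getElem row 0 hlt] at hne0
    have hall : (r0 :: rest).all (fun row => PySem.List.pyGet? row j == some 0) = false := by
      rw [List.all_eq_false]
      refine ⟨row, hm, ?_⟩
      rw [hk, PySem.List.pyGet?_natCast, List.getElem?_eq_getElem hlt]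
      simpa using hne0
    rw [hall]
    rfl
  · rw [if_neg hE]
    have hall : (r0 :: rest).all (fun row => PySem.List.pyGet? row j == some 0) = true := by
      rw [List.all_eq_true]
      intro row hm
      have hlt : j.toNat < row.length := lt_of_lt_of_le hkn (hlen row hm)
      have h0 : row[j.toNat] = 0 := by
        by_contra hne0
        exact hE ⟨row, hm, hlt, by rw [List.getD_eq_getElem row 0 hlt]; exact hne0⟩
      rw [hk, PySem.List.pyGet?_natCast, List.getElem?_eq_getElem hlt]
      simp [h0]
    rw [hall]
    rfl
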